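-- pv_equiv track=rewrite | github.com/cafe-jun/codingTest-Algo | 발란/solution1.py | solution
-- ===== SOURCE A (Python) =====
-- def solution(N, relation, dirname):
--     # 디렉토리 관계와 이름 정보 저장
--     graph = {i: [] for i in range(1, N+1)}
--     names = {i: dirname[i-1] for i in range(1, N+1)}
--
--     # 관계 정보 기반으로 그래프 생성
--     for parent, child in relation:
--         graph[parent].append(child)
--
--     # DFS 함수 정의
--     def dfs(node):
--         max_length = 0
--         if node not in graph:
--             return len(names[node])
--         for child_node in graph[node]:
--             max_length = max(max_length, dfs(child_node) + len(names[node]) + 1)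
--         return max_length
--
--     # 최상위 디렉토리부터 DFS 시작
--     return dfs(1) - 1  # root 부터 시작하기 때문에 마지막 '/' 제거
-- ===== SOURCE B (Python) =====
-- def solution(N, relation, dirname):
--     # Top-down accumulation: thread the path length down to each leaf and keep one
--     # running maximum, instead of A's bottom-up maxima returned from the recursion.
--     # Children live in a plain list indexed by node (0..N).
--     children = [[] for _ in range(N + 1)]
--     for parent, child in relation:
--         children[parent].append(child)
--     best = 0
--
--     def walk(node, acc):
--         nonlocal best
--         kids = children[node]
--         if not kids:
--             if acc > best:
--                 best = acc
--         else:
--             step = len(dirname[node - 1]) + 1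
--             for c in kids:
--                 walk(c, acc + step)
--
--     walk(1, 0)
--     return best - 1
-- ===== Notes on version B (the rewrite author's own statement) =====
-- stated objective: alternative
-- what changed: Replaces A's bottom-up recursion (each call returns the max path length of its subtree, combined with max on the way up) by a top-down traversal that threads the accumulated path length down as an argument and updates one running maximum at the leaves.
import Mathlib
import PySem

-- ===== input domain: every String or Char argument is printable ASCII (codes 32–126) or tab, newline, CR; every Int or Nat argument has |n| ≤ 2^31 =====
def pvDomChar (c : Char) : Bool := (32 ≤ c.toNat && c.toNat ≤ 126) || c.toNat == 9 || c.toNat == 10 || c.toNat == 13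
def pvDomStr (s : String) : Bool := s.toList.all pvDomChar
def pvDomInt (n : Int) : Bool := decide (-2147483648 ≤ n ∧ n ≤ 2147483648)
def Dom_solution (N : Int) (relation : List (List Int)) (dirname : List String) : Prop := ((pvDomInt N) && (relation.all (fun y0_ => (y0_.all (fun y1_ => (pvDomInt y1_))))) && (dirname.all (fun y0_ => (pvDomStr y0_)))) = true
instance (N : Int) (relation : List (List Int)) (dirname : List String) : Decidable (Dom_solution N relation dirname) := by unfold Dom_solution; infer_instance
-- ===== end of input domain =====

-- B threads the accumulated path length top-down to each leaf keeping one running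
-- maximum, instead of A's bottom-up maxima returned from the recursion (alternative decomposition).

-- ===== PORT A =====
-- A's inner 'dfs'; the fuel argument only makes the recursion total in Lean and is
-- never exhausted on inputs admitted by Pre_solution (recursion depth ≤ N there).
def dfsA (graph : PySem.Dict Int (List Int)) (names : PySem.Dict Int String) (fuel : Nat) (node : Int) : Int :=
  match fuel with
  | 0 => 0
  | Nat.succ f =>
    if (graph.get? node).isNone then
      -- Python: 'return len(names[node])' (this branch always raises KeyError in Python,
      -- since graph and names have the same keys; it lies outside Pre_solution)
      PySem.Str.len (names.getD node "")
    else
      (graph.getD node []).foldl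
        (fun m c => max m (dfsA graph names f c + PySem.Str.len (names.getD node "") + 1)) 0

def solution (N : Int) (relation : List (List Int)) (dirname : List String) : Int :=
  let graph0 := (PySem.List.pyRange 1 (N+1) 1).foldl (fun d i => d.insert i ([] : List Int)) PySem.Dict.empty
  let names := (PySem.List.pyRange 1 (N+1) 1).foldl (fun d i => d.insert i (PySem.List.pyGetD dirname (i-1) "")) PySem.Dict.empty
  -- 'for parent, child: graph[parent].append(child)' ported as Dict.modify; the tuple
  -- unpacking is pyGetD e 0 / e 1 (ValueError/KeyError cases lie outside Pre_solution)
  let graph := relation.foldl (fun g e => g.modify (PySem.List.pyGetD e 0 0) [] (fun l => l ++ [PySem.List.pyGetD e 1 0])) graph0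
  dfsA graph names (N.toNat + relation.length + 1) 1 - 1

-- ===== PORT B =====
-- B's inner 'walk(node, acc)' mutating 'best': ported as best-in/best-out; fuel is the
-- Lean totality artifact again, never exhausted under Pre_solution.
def walkB (children : List (List Int)) (dirname : List String) (fuel : Nat) (node acc best : Int) : Int :=
  match fuel with
  | 0 => best
  | Nat.succ f =>
    if (PySem.List.pyGetD children node []) = [] then
      if best < acc then acc else best
    else
      (PySem.List.pyGetD children node []).foldl
        (fun b c => walkB children dirname f c (acc + (PySem.Str.len (PySem.List.pyGetD dirname (node - 1) "") + 1)) b) best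

def solution_alt (N : Int) (relation : List (List Int)) (dirname : List String) : Int :=
  -- '[[] for _ in range(N+1)]' and 'children[parent].append(child)' ported with
  -- Python list-index semantics (pySetD/pyGetD; the row unpacking as in port A)
  let children0 := List.replicate (N+1).toNat ([] : List Int)
  let children := relation.foldl (fun ch e =>
    PySem.List.pySetD ch (PySem.List.pyGetD e 0 0)
      ((PySem.List.pyGetD ch (PySem.List.pyGetD e 0 0) []) ++ [PySem.List.pyGetD e 1 0])) children0
  walkB children dirname (N.toNat + relation.length + 1) 1 0 0 - 1

-- ===== PRECONDITION & SPEC =====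
-- A row must be a pair [p, c] with the parent p a key of A's graph dict (1..N);
-- otherwise A raises ValueError/KeyError while building the graph. The child c is
-- unconstrained here: A only dereferences nodes reachable from the root.
def validRow (N : Int) (e : List Int) : Bool :=
  match e with
  | [p, _] => decide (1 ≤ p) && decide (p ≤ N)
  | _ => false

-- children of x, in relation order (the adjacency list both programs build)
def adj (relation : List (List Int)) (x : Int) : List Int :=
  (((relation.map (fun e => (PySem.List.pyGetD e 0 0, PySem.List.pyGetD e 1 0))).filter (fun p => p.1 == x)).map (·.2))

-- the (deduplicated) set of nodes reachable from the root in exactly k steps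
def frontierK (relation : List (List Int)) : Nat → List Int
  | 0 => [1]
  | k+1 => ((frontierK relation k).flatMap (adj relation)).dedup

-- Pre_solution holds exactly where the Python A returns normally: N in 1..len(dirname)
-- (else KeyError/IndexError), every row a pair with a valid parent (else
-- ValueError/KeyError), every node reachable from the root a valid key (else KeyError),
-- and no walk of length N from the root, i.e. the reachable part is acyclic (else
-- A's recursion never terminates: RecursionError). 'min N.toNat dirname.length' only
-- keeps the check cheap to evaluate for huge N: it equals N.toNat whenever the first
-- two conjuncts hold, so nothing A returns on is excluded.
def Pre_solution (N : Int) (relation : List (List Int)) (dirname : List String) : Prop :=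
  1 ≤ N ∧ N ≤ (dirname.length : Int) ∧ relation.all (validRow N) = true ∧
  (∀ k : Nat, k < min N.toNat dirname.length → (frontierK relation k).all (fun node => decide (1 ≤ node ∧ node ≤ N)) = true) ∧
  frontierK relation (min N.toNat dirname.length) = []
instance (N : Int) (relation : List (List Int)) (dirname : List String) : Decidable (Pre_solution N relation dirname) := by unfold Pre_solution; infer_instance

def pvWitness_solution : Int × List (List Int) × List String := (3, [[1, 2], [2, 3]], ["a", "bb", "ccc"])

def Spec_solution (N : Int) (relation : List (List Int)) (dirname : List String) (out : Int) : Prop := out = solution_alt N relation dirname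
instance (N : Int) (relation : List (List Int)) (dirname : List String) (out : Int) : Decidable (Spec_solution N relation dirname out) := by unfold Spec_solution; infer_instance

-- ===== CLAIM (what is proved, stated in full; the proofs are below) =====
def Claim_equal_solution : Prop := ∀ (N : Int) (relation : List (List Int)) (dirname : List String), Dom_solution N relation dirname → Pre_solution N relation dirname → Spec_solution N relation dirname (solution N relation dirname)

-- ===== LEMMAS AND PROOFS =====

-- proof-side names for the structures the two ports build (definitionally the ports' lets)
def gA (N : Int) (relation : List (List Int)) : PySem.Dict Int (List Int) :=
  relation.foldl (fun g e => g.modify (PySem.List.pyGetD e 0 0) [] (fun l => l ++ [PySem.List.pyGetD e 1 0]))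
    ((PySem.List.pyRange 1 (N+1) 1).foldl (fun d i => d.insert i ([] : List Int)) PySem.Dict.empty)

def nmA (N : Int) (dirname : List String) : PySem.Dict Int String :=
  (PySem.List.pyRange 1 (N+1) 1).foldl (fun d i => d.insert i (PySem.List.pyGetD dirname (i-1) "")) PySem.Dict.empty

def chB (N : Int) (relation : List (List Int)) : List (List Int) :=
  relation.foldl (fun ch e =>
    PySem.List.pySetD ch (PySem.List.pyGetD e 0 0)
      ((PySem.List.pyGetD ch (PySem.List.pyGetD e 0 0) []) ++ [PySem.List.pyGetD e 1 0]))
    (List.replicate (N+1).toNat ([] : List Int))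

theorem solution_eq_dfs (N : Int) (relation : List (List Int)) (dirname : List String) :
    solution N relation dirname = dfsA (gA N relation) (nmA N dirname) (N.toNat + relation.length + 1) 1 - 1 := rfl

theorem solution_alt_eq_walk (N : Int) (relation : List (List Int)) (dirname : List String) :
    solution_alt N relation dirname = walkB (chB N relation) dirname (N.toNat + relation.length + 1) 1 0 0 - 1 := rfl

theorem foldl_pairs (rel : List (List Int)) (d : PySem.Dict Int (List Int)) :
    rel.foldl (fun g e => g.modify (PySem.List.pyGetD e 0 0) [] (fun l => l ++ [PySem.List.pyGetD e 1 0])) d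
      = (rel.map (fun e => (PySem.List.pyGetD e 0 0, PySem.List.pyGetD e 1 0))).foldl
          (fun g p => g.modify p.1 [] (fun l => l ++ [p.2])) d := by
  induction rel generalizing d with
  | nil => rfl
  | cons e rest ih => simp only [List.foldl_cons, List.map_cons]; exact ih _

theorem foldl_insert_get? {ν : Type} (l : List Int) (d : PySem.Dict Int ν) (f : Int → ν) (x : Int) :
    (l.foldl (fun d i => d.insert i (f i)) d).get? x = if x ∈ l then some (f x) else d.get? x := by
  induction l generalizing d with
  | nil => simp
  | cons a l ih =>
    simp only [List.foldl_cons, ih, List.mem_cons]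
    by_cases hx : x ∈ l
    · simp [hx]
    · by_cases hxa : x = a
      · simp [hxa]
      · simp [hx, hxa, PySem.Dict.get?_insert]

theorem getD_gA (N : Int) (relation : List (List Int)) (x : Int) :
    (gA N relation).getD x [] = adj relation x := by
  unfold gA adj
  rw [foldl_pairs]
  rw [PySem.Dict.getD_foldl_modify_append]
  rw [PySem.Dict.getD_eq_get?_getD, foldl_insert_get? _ _ (fun _ => ([] : List Int))]
  split_ifs <;> simp

theorem validRow_bounds (N : Int) (e : List Int) (h : validRow N e = true) :
    1 ≤ PySem.List.pyGetD e 0 0 ∧ PySem.List.pyGetD e 0 0 ≤ N := by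
  unfold validRow at h
  match e with
  | [p, c] =>
    simp only [Bool.and_eq_true, decide_eq_true_eq] at h
    simpa [PySem.List.pyGetD_zero_cons] using h
  | [] => simp at h
  | [_] => simp at h
  | _ :: _ :: _ :: _ => simp at h

theorem pyGetD_replicate_nil (m : Nat) (x : Int) :
    PySem.List.pyGetD (List.replicate m ([] : List Int)) x [] = [] := by
  by_cases hin : PySem.Raise.InRange (List.replicate m ([] : List Int)).length x
  · exact List.eq_of_mem_replicate (PySem.List.pyGetD_mem _ _ hin)
  · exact PySem.List.pyGetD_of_none _ _ _ ((PySem.List.pyGet?_eq_none_iff _ _).mpr hin)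

theorem getB_aux (N : Int) (x : Int) (h1 : 1 ≤ x) (h2 : x ≤ N) :
    ∀ (rel : List (List Int)), rel.all (validRow N) = true →
    ∀ ch : List (List Int), ch.length = (N+1).toNat →
      PySem.List.pyGetD (rel.foldl (fun ch e =>
          PySem.List.pySetD ch (PySem.List.pyGetD e 0 0)
            ((PySem.List.pyGetD ch (PySem.List.pyGetD e 0 0) []) ++ [PySem.List.pyGetD e 1 0])) ch) x []
        = PySem.List.pyGetD ch x [] ++ adj rel x := by
  intro rel
  induction rel with
  | nil => intro _ ch _; simp [adj]
  | cons e rest ih =>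
    intro hall ch hlen
    rw [List.all_cons, Bool.and_eq_true] at hall
    obtain ⟨hp1, hp2⟩ := validRow_bounds N e hall.1
    set p := PySem.List.pyGetD e 0 0 with hpdef
    set c := PySem.List.pyGetD e 1 0 with hcdef
    simp only [List.foldl_cons]
    have hcast : ((p.toNat : Nat) : Int) = p := Int.toNat_of_nonneg (by omega)
    have hplt : p.toNat < ch.length := by omega
    have hcastx : ((x.toNat : Nat) : Int) = x := Int.toNat_of_nonneg (by omega)
    have hstep : PySem.List.pyGetD
        (PySem.List.pySetD ch p (PySem.List.pyGetD ch p [] ++ [c])) x []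
        = if x = p then PySem.List.pyGetD ch p [] ++ [c] else PySem.List.pyGetD ch x [] := by
      rw [← hcast, ← hcastx, PySem.List.pyGetD_pySetD_natCast _ _ _ _ _ hplt]
      by_cases hxp : x.toNat = p.toNat
      · simp [hxp]
      · rw [if_neg hxp, if_neg (by omega)]
    have hlen' : (PySem.List.pySetD ch p (PySem.List.pyGetD ch p [] ++ [c])).length = (N+1).toNat := by
      rw [PySem.List.length_pySetD]; exact hlen
    rw [ih hall.2 _ hlen', hstep]
    have hadj : adj (e :: rest) x = (if p = x then [c] else []) ++ adj rest x := by
      simp only [adj, List.map_cons, List.filter_cons, ← hpdef, ← hcdef]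
      by_cases hpx : p = x
      · simp [hpx]
      · simp [hpx]
    rw [hadj]
    by_cases hpx : x = p
    · simp [hpx, List.append_assoc]
    · simp only [if_neg hpx, if_neg (fun h : p = x => hpx h.symm), List.nil_append]

theorem getB (N : Int) (relation : List (List Int)) (x : Int)
    (hall : relation.all (validRow N) = true) (h1 : 1 ≤ x) (h2 : x ≤ N) :
    PySem.List.pyGetD (chB N relation) x [] = adj relation x := by
  unfold chB
  rw [getB_aux N x h1 h2 relation hall _ (by simp), pyGetD_replicate_nil]
  rfl

theorem getD_nmA (N : Int) (dirname : List String) (node : Int) (h1 : 1 ≤ node) (h2 : node ≤ N) :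
    (nmA N dirname).getD node "" = PySem.List.pyGetD dirname (node - 1) "" := by
  unfold nmA
  rw [PySem.Dict.getD_eq_get?_getD, foldl_insert_get? _ _ (fun i => PySem.List.pyGetD dirname (i-1) "")]
  rw [if_pos (by rw [PySem.List.mem_pyRange_one]; omega)]
  rfl

theorem get?_gA_ne_none (N : Int) (relation : List (List Int)) (x : Int) (h1 : 1 ≤ x) (h2 : x ≤ N) :
    (gA N relation).get? x ≠ none := by
  unfold gA
  have base : ((PySem.List.pyRange 1 (N+1) 1).foldl (fun d i => d.insert i ([] : List Int)) PySem.Dict.empty).get? x ≠ none := by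
    rw [foldl_insert_get? _ _ (fun _ => ([] : List Int))]
    rw [if_pos (by rw [PySem.List.mem_pyRange_one]; omega)]
    simp
  generalize ((PySem.List.pyRange 1 (N+1) 1).foldl (fun d i => d.insert i ([] : List Int)) PySem.Dict.empty) = d at base ⊢
  induction relation generalizing d with
  | nil => exact base
  | cons e rest ih =>
    simp only [List.foldl_cons]
    apply ih
    intro hc
    apply base
    rw [PySem.Dict.get?_eq_none_iff_contains] at hc ⊢
    rw [PySem.Dict.contains_modify] at hc
    simp only [Bool.or_eq_false_iff] at hc
    exact hc.2

theorem str_len_nonneg (s : String) : 0 ≤ PySem.Str.len s := by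
  rw [PySem.Str.len_eq]; positivity

theorem foldl_max_ge_init (l : List Int) (f : Int → Int) (acc : Int) :
    acc ≤ l.foldl (fun m c => max m (f c)) acc := by
  induction l generalizing acc with
  | nil => simp
  | cons a l ih => exact le_trans (le_max_left _ _) (ih (max acc (f a)))

theorem dfsA_nonneg (g : PySem.Dict Int (List Int)) (nm : PySem.Dict Int String) (fuel : Nat) (node : Int) :
    0 ≤ dfsA g nm fuel node := by
  cases fuel with
  | zero => simp [dfsA]
  | succ f =>
    simp only [dfsA]
    split
    · exact str_len_nonneg _
    · exact foldl_max_ge_init _ _ 0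

theorem mem_frontier_step (relation : List (List Int)) (k : Nat) (p c : Int)
    (hp : p ∈ frontierK relation k) (hc : c ∈ adj relation p) : c ∈ frontierK relation (k+1) := by
  simp only [frontierK, List.mem_dedup, List.mem_flatMap]
  exact ⟨p, hp, hc⟩

theorem frontier_empty_add (relation : List (List Int)) (k : Nat) (h : frontierK relation k = []) :
    ∀ d, frontierK relation (k + d) = [] := by
  intro d
  induction d with
  | zero => exact h
  | succ d ih => show frontierK relation (k + d + 1) = []; simp [frontierK, ih]

theorem mem_frontier_lt (relation : List (List Int)) (n : Nat) (hE : frontierK relation n = [])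
    (k : Nat) (node : Int) (hmem : node ∈ frontierK relation k) : k < n := by
  by_contra h
  have : frontierK relation k = [] := by
    have := frontier_empty_add relation n hE (k - n)
    rwa [show n + (k - n) = k by omega] at this
  simp [this] at hmem

theorem foldl_max_absorb (h : Int → Int) (xs : List Int) : ∀ (a b : Int),
    xs.foldl (fun m x => max m (h x)) (max a b) = max a (xs.foldl (fun m x => max m (h x)) b) := by
  induction xs with
  | nil => intro a b; simp
  | cons x t ih =>
    intro a b
    simp only [List.foldl_cons]
    rw [max_assoc]
    exact ih a _

theorem foldl_max_addleft (h : Int → Int) (acc : Int) (xs : List Int) : ∀ (i : Int),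
    xs.foldl (fun b c => max b (acc + h c)) (acc + i) = acc + xs.foldl (fun m c => max m (h c)) i := by
  induction xs with
  | nil => intro i; simp
  | cons x t ih =>
    intro i
    simp only [List.foldl_cons]
    rw [show max (acc + i) (acc + h x) = acc + max i (h x) from by omega]
    exact ih _

theorem foldl_max_shift (xs : List Int) (g : Int → Int) (L acc best : Int)
    (hxs : xs ≠ []) (hL : 0 ≤ L) (hg : ∀ x ∈ xs, 0 ≤ g x) :
    xs.foldl (fun b c => max b (acc + (L + 1) + g c)) best
      = max best (acc + xs.foldl (fun m c => max m (g c + L + 1)) 0) := by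
  match xs with
  | [] => exact absurd rfl hxs
  | y :: t =>
    simp only [List.foldl_cons]
    rw [foldl_max_absorb (fun c => acc + (L + 1) + g c) t best (acc + (L + 1) + g y)]
    rw [show max 0 (g y + L + 1) = g y + L + 1 from by have := hg y (by simp); omega]
    congr 1
    rw [show (fun (b c : Int) => max b (acc + (L + 1) + g c)) = (fun (b c : Int) => max b (acc + (g c + L + 1))) from by funext b c; omega]
    rw [show acc + (L + 1) + g y = acc + (g y + L + 1) from by ring]
    exact foldl_max_addleft (fun c => g c + L + 1) acc t (g y + L + 1)

-- the core correspondence: B's walk with accumulator acc and running maximum best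
-- computes max best (acc + A's dfs value), at the same fuel, for any reachable node
theorem walk_eq (N : Int) (relation : List (List Int)) (dirname : List String)
    (hall : relation.all (validRow N) = true)
    (hbound : ∀ k : Nat, k < N.toNat → (frontierK relation k).all (fun node => decide (1 ≤ node ∧ node ≤ N)) = true)
    (hE : frontierK relation N.toNat = []) :
    ∀ (f k : Nat) (node acc best : Int),
      node ∈ frontierK relation k → N.toNat - k < f →
      walkB (chB N relation) dirname f node acc best
        = max best (acc + dfsA (gA N relation) (nmA N dirname) f node) := by
  intro f
  induction f with
  | zero => intro k node acc best _ hf; exact absurd hf (by omega)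
  | succ f ih =>
    intro k node acc best hmem hf
    have hk : k < N.toNat := mem_frontier_lt relation N.toNat hE k node hmem
    have hrange : 1 ≤ node ∧ node ≤ N := by
      have := List.all_eq_true.mp (hbound k hk) node hmem
      exact of_decide_eq_true this
    obtain ⟨h1, h2⟩ := hrange
    simp only [walkB, dfsA]
    have hA : ¬ (((gA N relation).get? node).isNone = true) := by
      simp [get?_gA_ne_none N relation node h1 h2]
    rw [if_neg hA]
    rw [getB N relation node hall h1 h2, getD_gA]
    simp only [getD_nmA N dirname node h1 h2]
    by_cases hkids : adj relation node = []
    · rw [if_pos hkids, hkids]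
      simp only [List.foldl_nil]
      split_ifs <;> omega
    · rw [if_neg hkids]
      have hcong : (adj relation node).foldl
          (fun b c => walkB (chB N relation) dirname f c (acc + (PySem.Str.len (PySem.List.pyGetD dirname (node - 1) "") + 1)) b) best
        = (adj relation node).foldl
          (fun b c => max b (acc + (PySem.Str.len (PySem.List.pyGetD dirname (node - 1) "") + 1)
              + dfsA (gA N relation) (nmA N dirname) f c)) best := by
        apply PySem.List.foldl_congr_mem
        intro b c hc
        exact ih (k+1) c _ b (mem_frontier_step relation k node c hmem hc) (by omega)
      rw [hcong]
      exact foldl_max_shift (adj relation node) (fun c => dfsA (gA N relation) (nmA N dirname) f c)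
        (PySem.Str.len (PySem.List.pyGetD dirname (node - 1) "")) acc best hkids
        (str_len_nonneg _) (fun x _ => dfsA_nonneg _ _ _ _)

-- ===== VERDICT (by name: the statement is the Claim_ definition above) =====
theorem solution_spec : Claim_equal_solution := by
  intro N relation dirname _ hpre
  obtain ⟨h1, h2, hall, hbound, hE⟩ := hpre
  have hmin : min N.toNat dirname.length = N.toNat := by omega
  rw [hmin] at hbound hE
  unfold Spec_solution
  rw [solution_eq_dfs, solution_alt_eq_walk]
  rw [walk_eq N relation dirname hall hbound hE (N.toNat + relation.length + 1) 0 1 0 0 (by simp [frontierK]) (by omega)]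
  have := dfsA_nonneg (gA N relation) (nmA N dirname) (N.toNat + relation.length + 1) 1
  omega
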